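-- pv_equiv track=rewrite | github.com/fastpaca/pacabench | agentbench/datasets.py | _flatten_sessions
-- ===== SOURCE A (Python) =====
-- def _flatten_sessions(sessions: list[list[dict[str, str]]]) -> list[dict[str, str]]:
--     """Flatten nested session structure into a single conversation history."""
--     turns = []
--
--     for session in sessions:
--         if isinstance(session, list):
--             turns.extend(session)
--         elif isinstance(session, dict):
--             turns.append(session)
--
--     return [turn for turn in turns if isinstance(turn, dict) and turn.get("content")]
-- ===== SOURCE B (Python) =====
-- def _flatten_sessions(sessions: list[list[dict[str, str]]]) -> list[dict[str, str]]:
--     """Structural recursion on the session list: filter the head session, prepend to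
--     the recursively flattened tail; no intermediate flattened list is built."""
--     if not sessions:
--         return []
--     session, rest = sessions[0], _flatten_sessions(sessions[1:])
--     if isinstance(session, list):
--         return [x for x in session if isinstance(x, dict) and x.get("content")] + rest
--     if isinstance(session, dict) and session.get("content"):
--         return [session] + rest
--     return rest
-- ===== Notes on version B (the rewrite author's own statement) =====
-- stated objective: alternative
-- what changed: B replaces A's two sequential passes (iterative flatten into an intermediate turns list, then a filtering comprehension) with a structural recursion on the session list that filters each session locally and prepends it to the recursively processed tail, never materialising the unfiltered flattened list.
import Mathlib
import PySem

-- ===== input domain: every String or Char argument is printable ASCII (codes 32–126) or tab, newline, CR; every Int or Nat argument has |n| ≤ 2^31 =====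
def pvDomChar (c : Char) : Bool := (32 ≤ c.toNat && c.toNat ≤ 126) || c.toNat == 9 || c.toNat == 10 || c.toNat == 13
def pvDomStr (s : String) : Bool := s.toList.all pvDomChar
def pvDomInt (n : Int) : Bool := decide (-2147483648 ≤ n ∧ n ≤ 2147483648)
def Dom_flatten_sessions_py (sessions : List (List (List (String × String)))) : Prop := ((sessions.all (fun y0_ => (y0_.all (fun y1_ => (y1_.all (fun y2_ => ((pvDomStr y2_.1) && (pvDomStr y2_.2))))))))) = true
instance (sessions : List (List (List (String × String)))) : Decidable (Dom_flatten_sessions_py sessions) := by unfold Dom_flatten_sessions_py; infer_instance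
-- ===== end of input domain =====

-- B replaces A's two sequential passes with a structural recursion that filters each
-- session locally and prepends it to the processed tail (objective: alternative).

-- shared helper: Python's `turn.get("content")` truthiness (non-empty string present)
def pvHasContent (t : List (String × String)) : Bool :=
  match (PySem.Dict.mk t).get? "content" with
  | some s => !(s == "")
  | none => false

-- ===== PORT A =====
-- pass 1: turns.extend(session) for each session (all sessions are lists at this type);
-- pass 2: the filtering list comprehension (all turns are dicts at this type)
def flatten_sessions_py (sessions : List (List (List (String × String)))) : List (List (String × String)) :=
  let turns := sessions.foldl (fun acc session => acc ++ session) []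
  turns.filter pvHasContent

-- ===== PORT B =====
-- structural recursion: filter the head session, prepend to the flattened tail
def flatten_sessions_py_alt : List (List (List (String × String))) → List (List (String × String))
  | [] => []
  | session :: rest => session.filter pvHasContent ++ flatten_sessions_py_alt rest

-- ===== PRECONDITION & SPEC =====
def Spec_flatten_sessions_py (sessions : List (List (List (String × String)))) (out : List (List (String × String))) : Prop := out = flatten_sessions_py_alt sessions
instance (sessions : List (List (List (String × String)))) (out : List (List (String × String))) : Decidable (Spec_flatten_sessions_py sessions out) := by unfold Spec_flatten_sessions_py; infer_instance

-- ===== CLAIM (what is proved, stated in full; the proofs are below) =====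
def Claim_equal_flatten_sessions_py : Prop := ∀ (sessions : List (List (List (String × String)))), Dom_flatten_sessions_py sessions → Spec_flatten_sessions_py sessions (flatten_sessions_py sessions)

-- ===== LEMMAS AND PROOFS =====

theorem flatten_sessions_alt_eq (sessions : List (List (List (String × String)))) :
    flatten_sessions_py_alt sessions = sessions.flatten.filter pvHasContent := by
  induction sessions with
  | nil => rfl
  | cons s rest ih =>
    simp [flatten_sessions_py_alt, ih, List.filter_append]

-- ===== VERDICT (by name: the statement is the Claim_ definition above) =====
theorem flatten_sessions_py_spec : Claim_equal_flatten_sessions_py := by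
  intro sessions _
  unfold Spec_flatten_sessions_py flatten_sessions_py
  rw [flatten_sessions_alt_eq, PySem.List.foldl_append_eq_flatten]
  simp
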